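-- pv_equiv track=rewrite | github.com/Basset-Hound-OSINT/basset-hound | archive/out-of-scope-ml/influence_service.py | _count_components_without_node
-- ===== SOURCE A (Python) =====
-- from typing import Any, Dict, List, Optional, Set, Tuple
--
-- def _count_components_without_node(
--
--     adjacency: Dict[str, Set[str]],
--     all_nodes: Set[str],
--     exclude_node: str
-- ) -> int:
--     """
--     Count connected components if a node is removed.
--     """
--     remaining_nodes = all_nodes - {exclude_node}
--     if not remaining_nodes:
--         return 0
--
--     visited = set()
--     components = 0
--
--     def dfs(node: str):
--         visited.add(node)
--         for neighbor in adjacency.get(node, set()):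
--             if neighbor != exclude_node and neighbor not in visited:
--                 dfs(neighbor)
--
--     for node in remaining_nodes:
--         if node not in visited:
--             dfs(node)
--             components += 1
--
--     return components
-- ===== SOURCE B (Python) =====
-- def _count_components_without_node(adjacency, all_nodes, exclude_node):
--     """Count connected components if a node is removed (iterative DFS)."""
--     remaining_nodes = all_nodes - {exclude_node}
--     if not remaining_nodes:
--         return 0
--
--     visited = set()
--     components = 0
--
--     for node in remaining_nodes:
--         if node not in visited:
--             components += 1
--             stack = [node]
--             while stack:
--                 cur = stack.pop()
--                 if cur == exclude_node or cur in visited: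
--                     continue
--                 visited.add(cur)
--                 stack.extend(reversed(list(adjacency.get(cur, ()))))
--
--     return components
-- ===== Notes on version B (the rewrite author's own statement) =====
-- stated objective: alternative
-- what changed: The recursive inner dfs (call stack, neighbor check before each recursive call) is replaced by an iterative traversal with an explicit stack that pushes raw neighbors and re-checks exclusion/visited at pop time.
import Mathlib
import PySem

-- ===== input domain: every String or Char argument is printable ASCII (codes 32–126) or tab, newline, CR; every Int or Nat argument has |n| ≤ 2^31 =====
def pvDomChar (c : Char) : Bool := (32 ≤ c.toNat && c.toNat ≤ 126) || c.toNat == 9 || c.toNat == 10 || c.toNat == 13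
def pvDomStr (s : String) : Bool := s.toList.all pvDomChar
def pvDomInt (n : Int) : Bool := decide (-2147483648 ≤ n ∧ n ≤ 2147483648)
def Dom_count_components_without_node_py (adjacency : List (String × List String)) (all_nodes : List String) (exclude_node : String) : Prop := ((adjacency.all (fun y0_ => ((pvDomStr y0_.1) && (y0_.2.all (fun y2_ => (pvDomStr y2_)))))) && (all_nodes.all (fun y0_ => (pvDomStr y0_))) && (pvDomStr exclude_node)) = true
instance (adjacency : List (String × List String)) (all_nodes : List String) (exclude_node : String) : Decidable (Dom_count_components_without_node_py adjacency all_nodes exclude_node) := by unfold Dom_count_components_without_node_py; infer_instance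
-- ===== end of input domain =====

-- B replaces A's recursive inner dfs by an iterative explicit-stack traversal (same directed
-- out-edges, shared visited set); equal return value, proved below (objective: alternative).

-- ===== PORT A =====
-- adjacency.get(node, set()): first-match association-list lookup, empty on a missing key
def pvAdjGet (adjacency : List (String × List String)) (node : String) : List String :=
  match adjacency with
  | [] => []
  | (k, v) :: rest => if k = node then v else pvAdjGet rest node

-- fuel: strictly more than the number of string occurrences in the input, so the
-- (fuel-guarded) recursions below never exhaust it on the actual calls
def pvFuel (adjacency : List (String × List String)) (all_nodes : List String) : Nat :=
  all_nodes.length + adjacency.foldl (fun a p => a + 1 + p.2.length) 0 + 1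

mutual
-- A's `def dfs(node): visited.add(node); for neighbor in adjacency.get(node, set()): …`
def pvDfsVisit (adjacency : List (String × List String)) (exclude_node : String) :
    Nat → List String → String → List String
  | 0, visited, _ => visited
  | f+1, visited, node =>
      pvDfsList adjacency exclude_node f (PySem.Set.add visited node) (pvAdjGet adjacency node)
termination_by f _ _ => (f, 0)
decreasing_by all_goals (first | (apply Prod.Lex.left; omega) | (apply Prod.Lex.right; omega) | (apply Prod.Lex.right; simp only [List.length_cons]; omega))
-- the `for neighbor in …` loop of dfs
def pvDfsList (adjacency : List (String × List String)) (exclude_node : String) :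
    Nat → List String → List String → List String
  | _, visited, [] => visited
  | f, visited, nb :: ns =>
      pvDfsList adjacency exclude_node f
        (if nb ≠ exclude_node ∧ ¬ nb ∈ visited then pvDfsVisit adjacency exclude_node f visited nb
         else visited) ns
termination_by f _ ns => (f, ns.length + 1)
decreasing_by all_goals (first | (apply Prod.Lex.left; omega) | (apply Prod.Lex.right; omega) | (apply Prod.Lex.right; simp only [List.length_cons]; omega))
end

def count_components_without_node_py (adjacency : List (String × List String)) (all_nodes : List String) (exclude_node : String) : Int :=
  let remaining := all_nodes.filter (fun n => n ≠ exclude_node)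
  if remaining.isEmpty then 0
  else
    (remaining.foldl
      (fun st node =>
        if node ∈ st.1 then st
        else (pvDfsVisit adjacency exclude_node (pvFuel adjacency all_nodes) st.1 node, st.2 + 1))
      (([] : List String), (0 : Int))).2

-- ===== PORT B =====
-- B's `while stack:` loop; head of the list = top of the Python stack, so
-- `stack.pop()` = take the head and `stack.extend(reversed(ns))` = `ns ++ rest`
def pvStackLoop (adjacency : List (String × List String)) (exclude_node : String) :
    Nat → List String → List String → List String
  | _, visited, [] => visited
  | 0, visited, cur :: rest =>
      if cur = exclude_node ∨ cur ∈ visited then pvStackLoop adjacency exclude_node 0 visited rest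
      else visited
  | f+1, visited, cur :: rest =>
      if cur = exclude_node ∨ cur ∈ visited then
        pvStackLoop adjacency exclude_node (f+1) visited rest
      else
        pvStackLoop adjacency exclude_node f (PySem.Set.add visited cur)
          (pvAdjGet adjacency cur ++ rest)
termination_by f _ st => (f, st.length)
decreasing_by all_goals (first | (apply Prod.Lex.left; omega) | (apply Prod.Lex.right; omega) | (apply Prod.Lex.right; simp only [List.length_cons]; omega))

def count_components_without_node_py_alt (adjacency : List (String × List String)) (all_nodes : List String) (exclude_node : String) : Int :=
  let remaining := all_nodes.filter (fun n => n ≠ exclude_node)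
  if remaining.isEmpty then 0
  else
    (remaining.foldl
      (fun st node =>
        if node ∈ st.1 then st
        else (pvStackLoop adjacency exclude_node (pvFuel adjacency all_nodes) st.1 [node], st.2 + 1))
      (([] : List String), (0 : Int))).2

-- ===== PRECONDITION & SPEC =====
def Spec_count_components_without_node_py (adjacency : List (String × List String)) (all_nodes : List String) (exclude_node : String) (out : Int) : Prop := out = count_components_without_node_py_alt adjacency all_nodes exclude_node
instance (adjacency : List (String × List String)) (all_nodes : List String) (exclude_node : String) (out : Int) : Decidable (Spec_count_components_without_node_py adjacency all_nodes exclude_node out) := by unfold Spec_count_components_without_node_py; infer_instance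

-- ===== CLAIM (what is proved, stated in full; the proofs are below) =====
def Claim_equal_count_components_without_node_py : Prop := ∀ (adjacency : List (String × List String)) (all_nodes : List String) (exclude_node : String), Dom_count_components_without_node_py adjacency all_nodes exclude_node → Spec_count_components_without_node_py adjacency all_nodes exclude_node (count_components_without_node_py adjacency all_nodes exclude_node)

-- ===== LEMMAS AND PROOFS =====

-- the universe of strings that can ever be visited
def pvU (adjacency : List (String × List String)) (all_nodes : List String) : List String :=
  all_nodes ++ adjacency.flatMap (fun p => p.1 :: p.2)

-- number of not-yet-visited universe nodes: the induction measure
def pvCnt (adjacency : List (String × List String)) (all_nodes : List String)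
    (v : List String) : Nat :=
  ((pvU adjacency all_nodes).toFinset.filter (fun x => ¬ x ∈ v)).card

lemma pvAdjGet_sub (adjacency : List (String × List String)) (all_nodes : List String)
    (n x : String) (hx : x ∈ pvAdjGet adjacency n) : x ∈ pvU adjacency all_nodes := by
  simp only [pvU, List.mem_append, List.mem_flatMap]
  right
  induction adjacency with
  | nil => simp [pvAdjGet] at hx
  | cons p rest ih =>
      obtain ⟨k, v⟩ := p
      rw [pvAdjGet] at hx
      by_cases h : k = n
      · rw [if_pos h] at hx
        exact ⟨(k, v), by simp, by simp [hx]⟩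
      · rw [if_neg h] at hx
        obtain ⟨q, hq1, hq2⟩ := ih hx
        exact ⟨q, by simp [hq1], hq2⟩

lemma pvCnt_lt (adjacency : List (String × List String)) (all_nodes : List String)
    (v : List String) (n : String) (hU : n ∈ pvU adjacency all_nodes) (hv : ¬ n ∈ v) :
    pvCnt adjacency all_nodes (PySem.Set.add v n) < pvCnt adjacency all_nodes v := by
  unfold pvCnt
  apply Finset.card_lt_card
  rw [Finset.ssubset_iff_of_subset]
  · refine ⟨n, ?_, ?_⟩
    · exact Finset.mem_filter.2 ⟨List.mem_toFinset.2 hU, by simpa using hv⟩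
    · intro hmem
      have := (Finset.mem_filter.1 hmem).2
      simp only [decide_eq_true_eq] at this
      exact this ((PySem.Set.mem_add _ _ _).2 (Or.inr rfl))
  · intro x hx
    have hx' := Finset.mem_filter.1 hx
    refine Finset.mem_filter.2 ⟨hx'.1, ?_⟩
    have h2 := hx'.2
    simp only [decide_eq_true_eq] at h2 ⊢
    intro hxv
    exact h2 ((PySem.Set.mem_add _ _ _).2 (Or.inl hxv))

lemma pvCnt_mono (adjacency : List (String × List String)) (all_nodes : List String)
    (v w : List String) (h : ∀ x, x ∈ v → x ∈ w) :
    pvCnt adjacency all_nodes w ≤ pvCnt adjacency all_nodes v := by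
  unfold pvCnt
  apply Finset.card_le_card
  intro x hx
  have hx' := Finset.mem_filter.1 hx
  refine Finset.mem_filter.2 ⟨hx'.1, ?_⟩
  have h2 := hx'.2
  simp only [decide_eq_true_eq] at h2 ⊢
  exact fun hxv => h2 (h x hxv)

lemma pvFoldl_len (adjacency : List (String × List String)) : ∀ a : Nat,
    adjacency.foldl (fun a p => a + 1 + p.2.length) a =
      a + (adjacency.flatMap (fun p => p.1 :: p.2)).length := by
  induction adjacency with
  | nil => simp
  | cons p rest ih =>
      intro a
      simp only [List.foldl_cons, List.flatMap_cons, List.length_append, List.length_cons]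
      rw [ih]
      omega

lemma pvFuel_gt (adjacency : List (String × List String)) (all_nodes : List String)
    (v : List String) : pvCnt adjacency all_nodes v < pvFuel adjacency all_nodes := by
  have h1 : pvCnt adjacency all_nodes v ≤ (pvU adjacency all_nodes).toFinset.card :=
    Finset.card_filter_le _ _
  have h2 : (pvU adjacency all_nodes).toFinset.card ≤ (pvU adjacency all_nodes).length :=
    List.toFinset_card_le _
  have h3 : (pvU adjacency all_nodes).length + 1 = pvFuel adjacency all_nodes := by
    unfold pvU pvFuel
    rw [pvFoldl_len adjacency 0, List.length_append]
    omega
  omega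

lemma pvGrow_list (adjacency : List (String × List String)) (exclude_node : String) :
    ∀ f ns v x, x ∈ v → x ∈ pvDfsList adjacency exclude_node f v ns := by
  intro f
  induction f using Nat.strong_induction_on with
  | _ f ihf =>
    intro ns
    induction ns with
    | nil => intro v x hx; rw [pvDfsList]; exact hx
    | cons nb ns ihn =>
        intro v x hx
        rw [pvDfsList]
        apply ihn
        split
        · cases f with
          | zero => rw [pvDfsVisit]; exact hx
          | succ f' =>
              rw [pvDfsVisit]
              exact ihf f' (by omega) _ _ _ ((PySem.Set.mem_add _ _ _).2 (Or.inl hx))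
        · exact hx

lemma pvDfsList_append (adjacency : List (String × List String)) (exclude_node : String)
    (f : Nat) : ∀ a b v, pvDfsList adjacency exclude_node f v (a ++ b) =
      pvDfsList adjacency exclude_node f (pvDfsList adjacency exclude_node f v a) b := by
  intro a
  induction a with
  | nil => intro b v; rw [pvDfsList]; rfl
  | cons nb ns ih =>
      intro b v
      rw [List.cons_append, pvDfsList, pvDfsList]
      exact ih b _

-- enough fuel: the dfs result does not depend on the exact fuel value
lemma pvStab (adjacency : List (String × List String)) (all_nodes : List String)
    (exclude_node : String) : ∀ k f g, k < f → k < g →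
    ∀ ns, (∀ x, x ∈ ns → x ∈ pvU adjacency all_nodes) →
    ∀ v, pvCnt adjacency all_nodes v ≤ k →
    pvDfsList adjacency exclude_node f v ns = pvDfsList adjacency exclude_node g v ns := by
  intro k
  induction k using Nat.strong_induction_on with
  | _ k ihk =>
    intro f g hf hg ns
    induction ns with
    | nil => intro _ v _; rw [pvDfsList, pvDfsList]
    | cons nb ns ihn =>
        intro hns v hc
        have hnbU : nb ∈ pvU adjacency all_nodes := hns nb (by simp)
        rw [pvDfsList, pvDfsList]
        by_cases hguard : nb ≠ exclude_node ∧ ¬ nb ∈ v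
        · obtain ⟨f', rfl⟩ : ∃ f', f = f' + 1 := ⟨f - 1, by omega⟩
          obtain ⟨g', rfl⟩ : ∃ g', g = g' + 1 := ⟨g - 1, by omega⟩
          have hcnt := pvCnt_lt adjacency all_nodes v nb hnbU hguard.2
          have hk1 : 1 ≤ k := by omega
          rw [if_pos hguard, if_pos hguard, pvDfsVisit, pvDfsVisit]
          have hsub : ∀ x, x ∈ pvAdjGet adjacency nb → x ∈ pvU adjacency all_nodes :=
            fun x hx => pvAdjGet_sub adjacency all_nodes nb x hx
          have hvis := ihk (k - 1) (by omega) f' g' (by omega) (by omega)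
            (pvAdjGet adjacency nb) hsub (PySem.Set.add v nb) (by omega)
          rw [hvis]
          have hgrow : ∀ x, x ∈ v →
              x ∈ pvDfsList adjacency exclude_node g' (PySem.Set.add v nb) (pvAdjGet adjacency nb) :=
            fun x hx => pvGrow_list adjacency exclude_node g' _ _ x ((PySem.Set.mem_add _ _ _).2 (Or.inl hx))
          have hcv' : pvCnt adjacency all_nodes
              (pvDfsList adjacency exclude_node g' (PySem.Set.add v nb) (pvAdjGet adjacency nb)) ≤ k :=
            le_trans (pvCnt_mono adjacency all_nodes v _ hgrow) hc
          exact ihn (fun x hx => hns x (by simp [hx])) _ hcv'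
        · rw [if_neg hguard, if_neg hguard]
          exact ihn (fun x hx => hns x (by simp [hx])) v hc

-- the bridge: the explicit stack loop computes exactly the recursive dfs fold
lemma pvMaster (adjacency : List (String × List String)) (all_nodes : List String)
    (exclude_node : String) : ∀ k fS fD, k < fS → k < fD →
    ∀ stack, (∀ x, x ∈ stack → x ∈ pvU adjacency all_nodes) →
    ∀ v, pvCnt adjacency all_nodes v ≤ k →
    pvStackLoop adjacency exclude_node fS v stack = pvDfsList adjacency exclude_node fD v stack := by
  intro k
  induction k using Nat.strong_induction_on with
  | _ k ihk =>
    intro fS fD hfS hfD stack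
    induction stack with
    | nil => intro _ v _; rw [pvStackLoop, pvDfsList]
    | cons cur rest ihn =>
        intro hst v hc
        have hcurU : cur ∈ pvU adjacency all_nodes := hst cur (by simp)
        obtain ⟨fS', rfl⟩ : ∃ f', fS = f' + 1 := ⟨fS - 1, by omega⟩
        rw [pvStackLoop, pvDfsList]
        by_cases hguard : cur = exclude_node ∨ cur ∈ v
        · rw [if_pos hguard, if_neg (by tauto)]
          exact ihn (fun x hx => hst x (by simp [hx])) v hc
        · obtain ⟨fD', rfl⟩ : ∃ f', fD = f' + 1 := ⟨fD - 1, by omega⟩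
          rw [not_or] at hguard
          rw [if_neg (by tauto), if_pos (by tauto)]
          have hcnt := pvCnt_lt adjacency all_nodes v cur hcurU hguard.2
          have hk1 : 1 ≤ k := by omega
          have hsub : ∀ x, x ∈ pvAdjGet adjacency cur ++ rest → x ∈ pvU adjacency all_nodes := by
            intro x hx
            rcases List.mem_append.1 hx with h | h
            · exact pvAdjGet_sub adjacency all_nodes cur x h
            · exact hst x (by simp [h])
          have hbridge := ihk (k - 1) (by omega) fS' fD' (by omega) (by omega)
            (pvAdjGet adjacency cur ++ rest) hsub (PySem.Set.add v cur) (by omega)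
          rw [hbridge, pvDfsList_append, pvDfsVisit]
          set w := pvDfsList adjacency exclude_node fD' (PySem.Set.add v cur) (pvAdjGet adjacency cur)
          have hcw : pvCnt adjacency all_nodes w ≤ k - 1 := by
            have h1 : ∀ x, x ∈ PySem.Set.add v cur → x ∈ w :=
              fun x hx => pvGrow_list adjacency exclude_node fD' _ _ x hx
            have := pvCnt_mono adjacency all_nodes (PySem.Set.add v cur) w h1
            omega
          exact pvStab adjacency all_nodes exclude_node (k - 1) fD' (fD' + 1) (by omega) (by omega)
            rest (fun x hx => hst x (by simp [hx])) w hcw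

-- ===== VERDICT (by name: the statement is the Claim_ definition above) =====
theorem count_components_without_node_py_spec : Claim_equal_count_components_without_node_py := by
  intro adjacency all_nodes exclude_node _
  unfold Spec_count_components_without_node_py
  unfold count_components_without_node_py count_components_without_node_py_alt
  simp only []
  by_cases hemp : (all_nodes.filter (fun n => n ≠ exclude_node)).isEmpty
  · rw [if_pos hemp, if_pos hemp]
  · rw [if_neg hemp, if_neg hemp]
    congr 1
    apply PySem.List.foldl_congr_mem
    intro st node hnode
    have hmem := List.mem_filter.1 hnode
    have hne : node ≠ exclude_node := by simpa using hmem.2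
    have hU : node ∈ pvU adjacency all_nodes := by
      simp [pvU, hmem.1]
    by_cases hv : node ∈ st.1
    · rw [if_pos hv, if_pos hv]
    · rw [if_neg hv, if_neg hv]
      have key : pvStackLoop adjacency exclude_node (pvFuel adjacency all_nodes) st.1 [node] =
          pvDfsVisit adjacency exclude_node (pvFuel adjacency all_nodes) st.1 node := by
        rw [pvMaster adjacency all_nodes exclude_node (pvCnt adjacency all_nodes st.1)
          (pvFuel adjacency all_nodes) (pvFuel adjacency all_nodes)
          (pvFuel_gt adjacency all_nodes st.1) (pvFuel_gt adjacency all_nodes st.1)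
          [node] (by intro x hx; simp at hx; subst hx; exact hU) st.1 le_rfl]
        rw [pvDfsList, if_pos ⟨hne, hv⟩, pvDfsList]
      rw [key]
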